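-- pv_equiv track=rewrite | github.com/mockupsoft/mgx-ai | backend/services/deepsite/mgx_bridge.py | _check_laravel_completeness
-- ===== SOURCE A (Python) =====
-- from typing import AsyncIterator, Dict, List, Optional, Tuple
--
-- def _check_laravel_completeness(files: Dict[str, str]) -> list[str]:
--     """
--     Laravel projesinin zorunlu katmanlarını kontrol eder.
--     Eksik katmanları liste olarak döndürür; tamamsa boş liste.
--     """
--     missing: list[str] = []
--
--     has_routes = any(
--         p.startswith("routes/web") or p.startswith("routes/api")
--         for p in files
--     )
--     if not has_routes:
--         missing.append("routes/ (web.php veya api.php yok)")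
--
--     has_controllers = any(
--         p.startswith("app/Http/Controllers/") and p.endswith(".php")
--         for p in files
--     )
--     if not has_controllers:
--         missing.append("app/Http/Controllers/ (hiç controller yok)")
--
--     has_views = any(p.startswith("resources/views/") for p in files)
--     if not has_views:
--         missing.append("resources/views/ (hiç Blade view yok)")
--
--     has_layout = any(
--         "layouts/app" in p or "layouts/main" in p or "layouts/base" in p
--         for p in files
--     )
--     if not has_layout:
--         missing.append("resources/views/layouts/app.blade.php (ana layout yok)")
--
--     return missing
-- ===== SOURCE B (Python) =====
-- _CHECKS = [
--     (lambda p: p.startswith("routes/web") or p.startswith("routes/api"),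
--      "routes/ (web.php veya api.php yok)"),
--     (lambda p: p.startswith("app/Http/Controllers/") and p.endswith(".php"),
--      "app/Http/Controllers/ (hi\u00e7 controller yok)"),
--     (lambda p: p.startswith("resources/views/"),
--      "resources/views/ (hi\u00e7 Blade view yok)"),
--     (lambda p: "layouts/app" in p or "layouts/main" in p or "layouts/base" in p,
--      "resources/views/layouts/app.blade.php (ana layout yok)"),
-- ]
--
-- def _check_laravel_completeness(files):
--     satisfied = {i for p in files for i, (pred, _) in enumerate(_CHECKS) if pred(p)}
--     return [msg for i, (_, msg) in enumerate(_CHECKS) if i not in satisfied]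
-- ===== Notes on version B (the rewrite author's own statement) =====
-- stated objective: alternative
-- what changed: Replaces A's four hard-coded any() scans with a data-driven table of (predicate, message) checks traversed file-major: one pass over the file keys collects the set of satisfied check indices, then a comprehension over the table emits the messages whose index is not in that set.
import Mathlib
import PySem

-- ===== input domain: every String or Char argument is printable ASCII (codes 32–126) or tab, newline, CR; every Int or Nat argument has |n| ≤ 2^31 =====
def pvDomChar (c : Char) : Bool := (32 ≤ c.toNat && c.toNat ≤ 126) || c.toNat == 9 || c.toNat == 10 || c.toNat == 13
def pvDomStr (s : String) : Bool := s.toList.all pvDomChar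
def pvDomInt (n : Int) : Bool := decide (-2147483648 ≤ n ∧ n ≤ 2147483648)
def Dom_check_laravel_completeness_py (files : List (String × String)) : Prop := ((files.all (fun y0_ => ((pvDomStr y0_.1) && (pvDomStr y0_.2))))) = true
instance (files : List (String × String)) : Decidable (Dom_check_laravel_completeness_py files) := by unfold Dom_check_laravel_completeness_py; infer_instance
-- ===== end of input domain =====

-- B replaces A's four hard-coded any() scans with a data-driven table of (predicate, message)
-- checks: one file-major pass collects the set of satisfied check indices, then the table
-- emits the messages whose index is missing (alternative decomposition, same cost).

-- shared predicates (byte-identical tests in both versions)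
def pvHasRoutes (p : String) : Bool :=
  PySem.Str.startswith p "routes/web" || PySem.Str.startswith p "routes/api"
def pvHasController (p : String) : Bool :=
  PySem.Str.startswith p "app/Http/Controllers/" && PySem.Str.endswith p ".php"
def pvHasView (p : String) : Bool :=
  PySem.Str.startswith p "resources/views/"
def pvHasLayout (p : String) : Bool :=
  PySem.Str.isIn "layouts/app" p || PySem.Str.isIn "layouts/main" p || PySem.Str.isIn "layouts/base" p

-- ===== PORT A =====
def check_laravel_completeness_py (files : List (String × String)) : List String :=
  let missing : List String := []
  let has_routes := files.any (fun kv => pvHasRoutes kv.1)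
  let missing := if !has_routes then missing ++ ["routes/ (web.php veya api.php yok)"] else missing
  let has_controllers := files.any (fun kv => pvHasController kv.1)
  let missing := if !has_controllers then missing ++ ["app/Http/Controllers/ (hiç controller yok)"] else missing
  let has_views := files.any (fun kv => pvHasView kv.1)
  let missing := if !has_views then missing ++ ["resources/views/ (hiç Blade view yok)"] else missing
  let has_layout := files.any (fun kv => pvHasLayout kv.1)
  let missing := if !has_layout then missing ++ ["resources/views/layouts/app.blade.php (ana layout yok)"] else missing
  missing

-- ===== PORT B =====
-- the _CHECKS table of Source B
def pvChecks : List ((String → Bool) × String) :=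
  [(pvHasRoutes, "routes/ (web.php veya api.php yok)"),
   (pvHasController, "app/Http/Controllers/ (hiç controller yok)"),
   (pvHasView, "resources/views/ (hiç Blade view yok)"),
   (pvHasLayout, "resources/views/layouts/app.blade.php (ana layout yok)")]

-- inner loop of the set comprehension: for one file key, add the indices of matching checks
def pvSatStep (s : PySem.Set Int) (kv : String × String) : PySem.Set Int :=
  (PySem.List.enumerate pvChecks 0).foldl
    (fun s ic => if ic.2.1 kv.1 then PySem.Set.add s ic.1 else s) s

def check_laravel_completeness_py_alt (files : List (String × String)) : List String :=
  let satisfied : PySem.Set Int := files.foldl pvSatStep PySem.Set.empty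
  (PySem.List.enumerate pvChecks 0).filterMap
    (fun ic => if ic.1 ∈ satisfied then none else some ic.2.2)

-- ===== PRECONDITION & SPEC =====
def Spec_check_laravel_completeness_py (files : List (String × String)) (out : List String) : Prop := out = check_laravel_completeness_py_alt files
instance (files : List (String × String)) (out : List String) : Decidable (Spec_check_laravel_completeness_py files out) := by unfold Spec_check_laravel_completeness_py; infer_instance

-- ===== CLAIM (what is proved, stated in full; the proofs are below) =====
def Claim_equal_check_laravel_completeness_py : Prop := ∀ (files : List (String × String)), Dom_check_laravel_completeness_py files → Spec_check_laravel_completeness_py files (check_laravel_completeness_py files)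

-- ===== LEMMAS AND PROOFS =====
-- membership after folding conditional adds over a check table
theorem pvMem_condAdd (l : List (Int × ((String → Bool) × String))) (p : String)
    (s : PySem.Set Int) (j : Int) :
    j ∈ l.foldl (fun s ic => if ic.2.1 p then PySem.Set.add s ic.1 else s) s ↔
      j ∈ s ∨ ∃ ic ∈ l, ic.2.1 p = true ∧ j = ic.1 := by
  induction l generalizing s with
  | nil => simp
  | cons ic rest ih =>
    simp only [List.foldl_cons, ih]
    by_cases h : ic.2.1 p <;> simp [h, PySem.Set.mem_add] <;> tauto

-- membership in the satisfied-index set, over all files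
theorem pvSat_mem (files : List (String × String)) (s : PySem.Set Int) (i : Int) :
    i ∈ files.foldl pvSatStep s ↔ i ∈ s ∨
      ∃ kv ∈ files, ∃ ic ∈ PySem.List.enumerate pvChecks 0, ic.2.1 kv.1 = true ∧ i = ic.1 := by
  induction files generalizing s with
  | nil => simp
  | cons kv rest ih =>
    simp only [List.foldl_cons, ih, pvSatStep, pvMem_condAdd]
    simp only [List.mem_cons, exists_eq_or_imp]
    exact or_assoc

-- ===== VERDICT (by name: the statement is the Claim_ definition above) =====
theorem check_laravel_completeness_py_spec : Claim_equal_check_laravel_completeness_py := by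
  intro files _
  unfold Spec_check_laravel_completeness_py check_laravel_completeness_py check_laravel_completeness_py_alt
  have h0 : ((0:Int) ∈ List.foldl pvSatStep ([] : PySem.Set Int) files) ↔ files.any (fun kv => pvHasRoutes kv.1) = true := by
    rw [pvSat_mem]
    simp [pvChecks, PySem.List.enumerate_cons, PySem.List.enumerate_nil, List.any_eq_true]
  have h1 : ((1:Int) ∈ List.foldl pvSatStep ([] : PySem.Set Int) files) ↔ files.any (fun kv => pvHasController kv.1) = true := by
    rw [pvSat_mem]
    simp [pvChecks, PySem.List.enumerate_cons, PySem.List.enumerate_nil, List.any_eq_true]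
  have h2 : ((2:Int) ∈ List.foldl pvSatStep ([] : PySem.Set Int) files) ↔ files.any (fun kv => pvHasView kv.1) = true := by
    rw [pvSat_mem]
    simp [pvChecks, PySem.List.enumerate_cons, PySem.List.enumerate_nil, List.any_eq_true]
  have h3 : ((3:Int) ∈ List.foldl pvSatStep ([] : PySem.Set Int) files) ↔ files.any (fun kv => pvHasLayout kv.1) = true := by
    rw [pvSat_mem]
    simp [pvChecks, PySem.List.enumerate_cons, PySem.List.enumerate_nil, List.any_eq_true]
  by_cases c0 : files.any (fun kv => pvHasRoutes kv.1) = true <;>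
    by_cases c1 : files.any (fun kv => pvHasController kv.1) = true <;>
    by_cases c2 : files.any (fun kv => pvHasView kv.1) = true <;>
    by_cases c3 : files.any (fun kv => pvHasLayout kv.1) = true <;>
      simp [pvChecks, PySem.List.enumerate_cons, PySem.List.enumerate_nil,
        h0, h1, h2, h3, c0, c1, c2, c3]
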